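-- pv_equiv track=rewrite | github.com/AiidaMP/DNAzyme-single-molecule | GetEventsFunctions.py | augment_event
-- ===== SOURCE A (Python) =====
-- def augment_event(donor_e, acceptor_e):
--     """
--     Given changes in donor and acceptor that define on state, augments the
--     valid state changes to account for possible noise or off-by-two frames.
--
--     :param donor_e: State changes for donor
--     :param acceptor_e: State changes for acceptor
--     :return: Tuple with List of augmented changes for donor and acceptor
--     """
--     # Start with only the first state change.
--     d_s = [[donor_e[0]]]
--     a_s = [[acceptor_e[0]]]
--
--     # Until we reach the event length.
--     for i in range(1, len(donor_e)):
--         new_as = []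
--         new_ds = []
--
--         # For each of the already accounted for states, creates.
--         for d, a in zip(d_s, a_s):
--             # A even were the acceptor is repeated.
--             new_as.append(a + [acceptor_e[i], acceptor_e[i]])
--             new_ds.append(d + [d[-1], donor_e[i]])
--
--             # A state were the acceptor is repeated twice.
--             new_as.append(a + [acceptor_e[i], acceptor_e[i], acceptor_e[i]])
--             new_ds.append(d + [d[-1], d[-1], donor_e[i]])
--
--             # A state were the donor is repeated.
--             new_as.append(a + [a[-1], acceptor_e[i]])
--             new_ds.append(d + [donor_e[i], donor_e[i]])
--
--             # A state were the donor is repeated twice.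
--             new_as.append(a + [a[-1], a[-1], acceptor_e[i]])
--             new_ds.append(d + [donor_e[i], donor_e[i], donor_e[i]])
--
--             # No state is repeated.
--             new_as.append(a + [acceptor_e[i]])
--             new_ds.append(d + [donor_e[i]])
--
--         d_s = new_ds
--         a_s = new_as
--
--     return d_s, a_s
-- ===== SOURCE B (Python) =====
-- def _choices(m):
--     """All base-5 digit tuples of length m, in lexicographic order."""
--     if m == 0:
--         return [[]]
--     return [[c] + t for c in range(5) for t in _choices(m - 1)]
--
--
-- def augment_event(donor_e, acceptor_e):
--     """
--     Same augmentation, but enumerated per choice tuple: each augmented pair is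
--     built directly from its base-5 digit list, using the fact that each
--     position's chunk depends only on the neighbouring raw values.
--     """
--     d0, a0 = donor_e[0], acceptor_e[0]
--     n = len(donor_e)
--     d_s, a_s = [], []
--     for choice in _choices(n - 1):
--         d, a = [d0], [a0]
--         for i, c in enumerate(choice):
--             dp, dv = donor_e[i], donor_e[i + 1]
--             ap, av = acceptor_e[i], acceptor_e[i + 1]
--             d += ([dp, dv], [dp, dp, dv], [dv, dv], [dv, dv, dv], [dv])[c]
--             a += ([av, av], [av, av, av], [ap, av], [ap, ap, av], [av])[c]
--         d_s.append(d)
--         a_s.append(a)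
--     return d_s, a_s
-- ===== Notes on version B (the rewrite author's own statement) =====
-- stated objective: alternative
-- what changed: Instead of A's breadth-first layer expansion that rewrites the whole population of partial sequences at every position, B enumerates the base-5 choice tuples in lexicographic order and builds each augmented pair independently from closed-form per-position chunks (each chunk depends only on the two neighbouring raw values, eliminating the d[-1]/a[-1] state).
import Mathlib
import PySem

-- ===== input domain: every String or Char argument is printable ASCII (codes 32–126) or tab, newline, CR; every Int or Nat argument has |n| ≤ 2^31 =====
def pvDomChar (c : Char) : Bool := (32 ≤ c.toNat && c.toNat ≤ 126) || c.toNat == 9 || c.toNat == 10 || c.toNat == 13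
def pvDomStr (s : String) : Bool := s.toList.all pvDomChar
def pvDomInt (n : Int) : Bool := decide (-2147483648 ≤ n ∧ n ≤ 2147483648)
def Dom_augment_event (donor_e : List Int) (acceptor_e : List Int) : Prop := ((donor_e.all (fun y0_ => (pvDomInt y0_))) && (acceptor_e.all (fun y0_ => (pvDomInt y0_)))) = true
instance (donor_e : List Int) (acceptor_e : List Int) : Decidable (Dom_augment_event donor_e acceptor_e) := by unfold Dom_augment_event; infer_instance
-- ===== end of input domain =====

-- B enumerates the base-5 choice tuples lexicographically and builds each augmented pair
-- directly from closed-form per-position chunks, instead of A's breadth-first layer expansion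
-- of the whole population of partial sequences (objective: alternative decomposition).

-- ===== PORT A =====
-- one iteration of A's outer loop (the inner 'for d, a in zip(d_s, a_s)' with its five appends)
def pvAStep (donor_e acceptor_e : List Int)
    (st : List (List Int) × List (List Int)) (i : Nat) :
    List (List Int) × List (List Int) :=
  let di := PySem.List.pyGetD donor_e (Int.ofNat i) 0
  let ai := PySem.List.pyGetD acceptor_e (Int.ofNat i) 0
  (st.1.zip st.2).foldl
    (fun acc da =>
      (acc.1 ++ [da.1 ++ [da.1.getLastD 0, di],
                 da.1 ++ [da.1.getLastD 0, da.1.getLastD 0, di],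
                 da.1 ++ [di, di],
                 da.1 ++ [di, di, di],
                 da.1 ++ [di]],
       acc.2 ++ [da.2 ++ [ai, ai],
                 da.2 ++ [ai, ai, ai],
                 da.2 ++ [da.2.getLastD 0, ai],
                 da.2 ++ [da.2.getLastD 0, da.2.getLastD 0, ai],
                 da.2 ++ [ai]]))
    ([], [])

def augment_event (donor_e : List Int) (acceptor_e : List Int) : List (List Int) × List (List Int) :=
  (List.range' 1 (donor_e.length - 1)).foldl (pvAStep donor_e acceptor_e)
    ([[PySem.List.pyGetD donor_e (Int.ofNat 0) 0]],
     [[PySem.List.pyGetD acceptor_e (Int.ofNat 0) 0]])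

-- ===== PORT B =====
-- all base-5 digit tuples of length m, lexicographic (Python helper _choices)
def pvChoices : Nat → List (List Nat)
  | 0 => [[]]
  | m + 1 => (List.range 5).flatMap (fun c => (pvChoices m).map (fun t => c :: t))

-- the 5-tuple indexed by c in Source B, donor side / acceptor side
def pvDch (c : Nat) (dp dv : Int) : List Int :=
  [[dp, dv], [dp, dp, dv], [dv, dv], [dv, dv, dv], [dv]].getD c []
def pvAch (c : Nat) (ap av : Int) : List Int :=
  [[av, av], [av, av, av], [ap, av], [ap, ap, av], [av]].getD c []

-- body of Source B's inner 'for i, c in enumerate(choice)' (state: position, d, a)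
def pvBStep (donor_e acceptor_e : List Int)
    (st : Nat × List Int × List Int) (c : Nat) : Nat × List Int × List Int :=
  let i := st.1
  let dp := PySem.List.pyGetD donor_e (Int.ofNat i) 0
  let dv := PySem.List.pyGetD donor_e (Int.ofNat (i + 1)) 0
  let ap := PySem.List.pyGetD acceptor_e (Int.ofNat i) 0
  let av := PySem.List.pyGetD acceptor_e (Int.ofNat (i + 1)) 0
  (i + 1, st.2.1 ++ pvDch c dp dv, st.2.2 ++ pvAch c ap av)

def pvBuild (donor_e acceptor_e : List Int) (cs : List Nat) : List Int × List Int :=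
  (cs.foldl (pvBStep donor_e acceptor_e)
    (0, [PySem.List.pyGetD donor_e (Int.ofNat 0) 0],
        [PySem.List.pyGetD acceptor_e (Int.ofNat 0) 0])).2

def augment_event_alt (donor_e : List Int) (acceptor_e : List Int) : List (List Int) × List (List Int) :=
  ((pvChoices (donor_e.length - 1)).map (pvBuild donor_e acceptor_e)).unzip

-- ===== PRECONDITION & SPEC =====
-- Pre_ excludes exactly the inputs where the Python A raises IndexError:
-- an empty donor list (donor_e[0]) or an acceptor list shorter than the donor list (acceptor_e[i]).
def Pre_augment_event (donor_e : List Int) (acceptor_e : List Int) : Prop :=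
  donor_e ≠ [] ∧ donor_e.length ≤ acceptor_e.length
instance (donor_e : List Int) (acceptor_e : List Int) : Decidable (Pre_augment_event donor_e acceptor_e) := by unfold Pre_augment_event; infer_instance

def pvWitness_augment_event : List Int × List Int := ([1, 2], [3, 4])

def Spec_augment_event (donor_e : List Int) (acceptor_e : List Int) (out : List (List Int) × List (List Int)) : Prop := out = augment_event_alt donor_e acceptor_e
instance (donor_e : List Int) (acceptor_e : List Int) (out : List (List Int) × List (List Int)) : Decidable (Spec_augment_event donor_e acceptor_e out) := by unfold Spec_augment_event; infer_instance

-- ===== CLAIM (what is proved, stated in full; the proofs are below) =====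
def Claim_equal_augment_event : Prop := ∀ (donor_e : List Int) (acceptor_e : List Int), Dom_augment_event donor_e acceptor_e → Pre_augment_event donor_e acceptor_e → Spec_augment_event donor_e acceptor_e (augment_event donor_e acceptor_e)

-- ===== LEMMAS AND PROOFS =====

lemma pvBStep_fst (donor_e acceptor_e : List Int) (cs : List Nat)
    (st : Nat × List Int × List Int) :
    (cs.foldl (pvBStep donor_e acceptor_e) st).1 = st.1 + cs.length := by
  induction cs generalizing st with
  | nil => simp
  | cons c cs ih => simp [ih, pvBStep]; omega

lemma pvBuild_snoc (donor_e acceptor_e : List Int) (cs : List Nat) (c : Nat) :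
    pvBuild donor_e acceptor_e (cs ++ [c]) =
      ((pvBuild donor_e acceptor_e cs).1 ++
         pvDch c (PySem.List.pyGetD donor_e (Int.ofNat cs.length) 0)
                 (PySem.List.pyGetD donor_e (Int.ofNat (cs.length + 1)) 0),
       (pvBuild donor_e acceptor_e cs).2 ++
         pvAch c (PySem.List.pyGetD acceptor_e (Int.ofNat cs.length) 0)
                 (PySem.List.pyGetD acceptor_e (Int.ofNat (cs.length + 1)) 0)) := by
  unfold pvBuild
  rw [List.foldl_append]
  simp only [List.foldl_cons, List.foldl_nil]
  simp [pvBStep, pvBStep_fst]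

lemma pvChoices_length {m : Nat} {t : List Nat} (h : t ∈ pvChoices m) : t.length = m := by
  induction m generalizing t with
  | zero => simp [pvChoices] at h; simp [h]
  | succ m ih =>
    simp [pvChoices] at h
    obtain ⟨c, -, t', ht', rfl⟩ := h
    simp [ih ht']

lemma pvChoices_lt {m : Nat} {t : List Nat} (h : t ∈ pvChoices m) : ∀ c ∈ t, c < 5 := by
  induction m generalizing t with
  | zero => simp [pvChoices] at h; simp [h]
  | succ m ih =>
    simp [pvChoices] at h
    obtain ⟨c, hc, t', ht', rfl⟩ := h
    intro x hx
    rcases List.mem_cons.mp hx with rfl | hx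
    · exact hc
    · exact ih ht' x hx

lemma pvChoices_snoc (m : Nat) :
    pvChoices (m + 1) =
      (pvChoices m).flatMap (fun t => (List.range 5).map (fun c => t ++ [c])) := by
  induction m with
  | zero => simp [pvChoices, ← List.map_eq_flatMap]
  | succ m ih =>
    conv_lhs => rw [pvChoices, ih]
    rw [pvChoices]
    simp only [List.map_flatMap, List.map_map, List.flatMap_assoc, List.flatMap_map,
      Function.comp_def, List.cons_append]

lemma pvBuild_lastD (donor_e acceptor_e : List Int) (cs : List Nat)
    (h : ∀ c ∈ cs, c < 5) :
    (pvBuild donor_e acceptor_e cs).1.getLastD 0 =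
        PySem.List.pyGetD donor_e (Int.ofNat cs.length) 0 ∧
    (pvBuild donor_e acceptor_e cs).2.getLastD 0 =
        PySem.List.pyGetD acceptor_e (Int.ofNat cs.length) 0 := by
  induction cs using List.reverseRecOn with
  | nil => constructor <;> simp [pvBuild]
  | append_singleton cs c ih =>
    rw [pvBuild_snoc]
    have hc : c < 5 := h c (by simp)
    interval_cases c <;> simp [pvDch, pvAch]

lemma pvFoldl_pair_append {α : Type} (l : List α)
    (f g : α → List (List Int)) (x y : List (List Int)) :
    l.foldl (fun acc da => (acc.1 ++ f da, acc.2 ++ g da)) (x, y) =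
      (x ++ l.flatMap f, y ++ l.flatMap g) := by
  induction l generalizing x y with
  | nil => simp
  | cons a l ih => simp [ih]

lemma pvMain (donor_e acceptor_e : List Int) (m : Nat) :
    (List.range' 1 m).foldl (pvAStep donor_e acceptor_e)
      ([[PySem.List.pyGetD donor_e (Int.ofNat 0) 0]],
       [[PySem.List.pyGetD acceptor_e (Int.ofNat 0) 0]]) =
      ((pvChoices m).map (pvBuild donor_e acceptor_e)).unzip := by
  induction m with
  | zero => simp [pvChoices, pvBuild]
  | succ m ih =>
    rw [List.range'_1_concat, List.foldl_append, List.foldl_cons, List.foldl_nil, ih]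
    simp only [pvAStep]
    rw [List.zip_unzip, pvFoldl_pair_append]
    rw [pvChoices_snoc, List.unzip_eq_map]
    simp only [List.map_flatMap, List.map_map, List.flatMap_map, List.nil_append,
      Function.comp_def, Nat.add_comm 1 m]
    refine Prod.ext ?_ ?_ <;>
    · refine List.flatMap_congr (fun t ht => ?_)
      have hlen : t.length = m := pvChoices_length ht
      have hl := pvBuild_lastD donor_e acceptor_e t (pvChoices_lt ht)
      rw [show List.range 5 = [0, 1, 2, 3, 4] by decide]
      simp [pvBuild_snoc, pvDch, pvAch, hlen]
      rw [← hlen]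
      first
      | simpa using hl.1
      | simpa using hl.2

-- ===== VERDICT (by name: the statement is the Claim_ definition above) =====
theorem augment_event_spec : Claim_equal_augment_event := by
  intro donor_e acceptor_e _ _
  unfold Spec_augment_event augment_event augment_event_alt
  exact pvMain donor_e acceptor_e (donor_e.length - 1)
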